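-- pv_equiv track=rewrite | github.com/deadcoast/niightjarcli | src/modules/simple_mod/simple_clock_3_big.py | create_framed_digital_clock
-- ===== SOURCE A (Python) =====
-- def create_framed_digital_clock(time_str):
--     # Representation of each digit on a 7-segment display (0-9), adjusted for tubes
--     digits = [
--         " _     _  _     _  _  _  _  _ ",
--         "| |  | _| _||_||_ |_   ||_||_|",
--         "|_|  ||_  _|  | _||_|  ||_| _|",
--         "                               "
--     ]
--
--     # Additional layer for bottom part of the frame
--     bottom_frame = "'-----'  '-----'     '-----' '-----'  '-----' '-----'"
--
--     # Mapping the time string (hh:mm:ss) to the digits representation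
--     digit_map = {str(num): index for index, num in enumerate("0123456789")}
--     lines = ["", "", "", ""]
--
--     for char in time_str:
--         if char in digit_map:
--             index = digit_map[char] * 3
--             for row in range(4):
--                 if row < 3:
--                     lines[row] += digits[row][index:index + 3]
--                 else:
--                     lines[row] += " .-----. "
--         else:
--             # For non-digit characters (colon), add spacing and framing as appropriate
--             for row in range(4):
--                 if row < 3:
--                     lines[row] += "  "
--                 else:
--                     lines[row] += "     "  # Spacing for between digits
--
--     # Adding the bottom frame to the last line
--     lines.append(bottom_frame)
--
--     return "\n".join(lines)
-- ===== SOURCE B (Python) =====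
-- def create_framed_digital_clock(time_str):
--     # Translation-table rendering: build four code-point -> segment tables once,
--     # then produce each display line with a single str.translate call (no
--     # per-character Python loop or branch at render time).
--     digits = [
--         " _     _  _     _  _  _  _  _ ",
--         "| |  | _| _||_||_ |_   ||_||_|",
--         "|_|  ||_  _|  | _||_|  ||_| _|",
--     ]
--
--     def seg(r, o):
--         if 48 <= o <= 57:
--             return " .-----. " if r == 3 else digits[r][(o - 48) * 3:(o - 48) * 3 + 3]
--         return "     " if r == 3 else "  "
--
--     tables = [{o: seg(r, o) for o in range(256)} for r in range(4)]
--     lines = [time_str.translate(t) for t in tables]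
--     lines.append("'-----'  '-----'     '-----' '-----'  '-----' '-----'")
--     return "\n".join(lines)
-- ===== Notes on version B (the rewrite author's own statement) =====
-- stated objective: faster
-- what changed: B precomputes four code-point->segment translation tables and renders each display line with one str.translate call, replacing A's per-character loop with dict lookup, inner row loop and repeated string concatenation onto four list-held accumulators.
import Mathlib
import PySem

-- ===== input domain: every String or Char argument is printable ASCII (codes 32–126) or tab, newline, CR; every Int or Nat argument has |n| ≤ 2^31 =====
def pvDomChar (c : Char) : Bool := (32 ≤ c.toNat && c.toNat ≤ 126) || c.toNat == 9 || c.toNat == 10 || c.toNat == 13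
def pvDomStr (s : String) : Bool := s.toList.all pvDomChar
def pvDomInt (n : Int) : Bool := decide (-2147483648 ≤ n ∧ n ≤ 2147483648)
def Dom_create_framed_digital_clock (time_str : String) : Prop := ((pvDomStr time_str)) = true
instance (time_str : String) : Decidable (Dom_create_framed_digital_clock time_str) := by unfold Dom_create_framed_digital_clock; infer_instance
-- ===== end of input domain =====

-- B renders each line with a precomputed code-point -> segment translation table
-- (str.translate) instead of A's per-character loop appending to four accumulators.

-- ===== PORT A =====
-- the `digits` rows used by the `row < 3` branches (the all-blank 4th row of A's
-- `digits` literal is never read, so it is not materialised here)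
def pvRow0 : List Char := " _     _  _     _  _  _  _  _ ".toList
def pvRow1 : List Char := "| |  | _| _||_||_ |_   ||_||_|".toList
def pvRow2 : List Char := "|_|  ||_  _|  | _||_|  ||_| _|".toList
def pvBottom : List Char := "'-----'  '-----'     '-----' '-----'  '-----' '-----'".toList

-- digit_map = {str(num): index for index, num in enumerate("0123456789")};
-- ported with Char keys (exact: every key is a single-character string)
def pvDigitMap : PySem.Dict Char Int :=
  (PySem.List.enumerate "0123456789".toList).foldl (fun d p => d.insert p.2 p.1) PySem.Dict.empty

-- one iteration of A's `for char in time_str` loop over the four accumulators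
-- (`char in digit_map` plus `digit_map[char]` ported as one get?; the
-- `for row in range(4)` / `if row < 3` body unrolled over the 4-tuple `lines`)
def pvStepA (acc : List Char × List Char × List Char × List Char) (c : Char) :
    List Char × List Char × List Char × List Char :=
  match pvDigitMap.get? c with
  | some v =>
    let index := v * 3
    (acc.1 ++ PySem.List.slice pvRow0 (some index) (some (index + 3)),
     acc.2.1 ++ PySem.List.slice pvRow1 (some index) (some (index + 3)),
     acc.2.2.1 ++ PySem.List.slice pvRow2 (some index) (some (index + 3)),
     acc.2.2.2 ++ " .-----. ".toList)
  | none =>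
    (acc.1 ++ "  ".toList,
     acc.2.1 ++ "  ".toList,
     acc.2.2.1 ++ "  ".toList,
     acc.2.2.2 ++ "     ".toList)

def create_framed_digital_clock (time_str : String) : String :=
  let lines := time_str.toList.foldl pvStepA ([], [], [], [])
  String.ofList (PySem.Chars.join "\n".toList
    [lines.1, lines.2.1, lines.2.2.1, lines.2.2.2, pvBottom])

-- ===== PORT B =====
-- Source B's helper `seg(r, o)`: the segment the row-r table maps code point o to
def pvSeg (r o : Int) : List Char :=
  if 48 ≤ o ∧ o ≤ 57 then
    if r = 3 then " .-----. ".toList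
    else PySem.List.slice (PySem.List.pyGetD [pvRow0, pvRow1, pvRow2] r [])
           (some ((o - 48) * 3)) (some ((o - 48) * 3 + 3))
  else if r = 3 then "     ".toList else "  ".toList

-- `{o: seg(r, o) for o in range(256)}` (dict comprehension = insert in order)
def pvTable (r : Int) : PySem.Dict Int (List Char) :=
  (PySem.List.pyRange 0 256 1).foldl (fun d o => d.insert o (pvSeg r o)) PySem.Dict.empty

-- hand port of `s.translate(t)` for a dict mapping code points to strings:
-- each character is replaced by t[ord(c)] when present, else kept (exact for
-- such tables; no character is mapped to None here)
def pvTranslate (t : PySem.Dict Int (List Char)) (cs : List Char) : List Char :=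
  cs.flatMap (fun c => (t.get? (c.toNat : Int)).getD [c])

def create_framed_digital_clock_alt (time_str : String) : String :=
  let tables := (PySem.List.pyRange 0 4 1).map pvTable
  let lines := tables.map (fun t => pvTranslate t time_str.toList)
  String.ofList (PySem.Chars.join "\n".toList (lines ++ [pvBottom]))

-- ===== PRECONDITION & SPEC =====
def Spec_create_framed_digital_clock (time_str : String) (out : String) : Prop := out = create_framed_digital_clock_alt time_str
instance (time_str : String) (out : String) : Decidable (Spec_create_framed_digital_clock time_str out) := by unfold Spec_create_framed_digital_clock; infer_instance

-- ===== CLAIM (what is proved, stated in full; the proofs are below) =====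
def Claim_equal_create_framed_digital_clock : Prop := ∀ (time_str : String), Dom_create_framed_digital_clock time_str → Spec_create_framed_digital_clock time_str (create_framed_digital_clock time_str)

-- ===== LEMMAS AND PROOFS =====

-- A's dict lookup characterised: a hit exactly on '0'..'9', returning the digit value
theorem pvDigitMap_get (c : Char) :
    pvDigitMap.get? c = if '0' ≤ c ∧ c ≤ '9' then some ((c.toNat : Int) - 48) else none := by
  by_cases hd : '0' ≤ c ∧ c ≤ '9'
  · have hl : 48 ≤ c.toNat := hd.1
    have hr : c.toNat ≤ 57 := hd.2
    have hc : c = Char.ofNat c.toNat := (Char.ofNat_toNat c).symm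
    interval_cases h : c.toNat <;> subst hc <;> decide
  · rw [if_neg hd]
    have ne : ∀ d : Char, ('0' ≤ d ∧ d ≤ '9') → c ≠ d := fun d hdd e => hd (e ▸ hdd)
    have hmk : pvDigitMap = PySem.Dict.mk [('0',0),('1',1),('2',2),('3',3),('4',4),('5',5),('6',6),('7',7),('8',8),('9',9)] := by decide
    rw [hmk]
    simp [PySem.Dict.get?,
      Ne.symm (ne '0' (by decide)), Ne.symm (ne '1' (by decide)), Ne.symm (ne '2' (by decide)),
      Ne.symm (ne '3' (by decide)), Ne.symm (ne '4' (by decide)), Ne.symm (ne '5' (by decide)),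
      Ne.symm (ne '6' (by decide)), Ne.symm (ne '7' (by decide)), Ne.symm (ne '8' (by decide)),
      Ne.symm (ne '9' (by decide))]

-- folding inserts over keys not equal to k leaves get? k unchanged
theorem pv_get?_foldl_insert_not_mem (f : Int → List Char) (l : List Int)
    (d : PySem.Dict Int (List Char)) (k : Int) (hk : k ∉ l) :
    (l.foldl (fun d o => d.insert o (f o)) d).get? k = d.get? k := by
  induction l generalizing d with
  | nil => rfl
  | cons o l ih =>
    simp only [List.mem_cons, not_or] at hk
    rw [List.foldl_cons, ih _ hk.2, PySem.Dict.get?_insert_of_ne _ _ hk.1]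

-- a key in the comprehension's range looks up its comprehension value
theorem pv_get?_foldl_insert_mem (f : Int → List Char) (l : List Int)
    (d : PySem.Dict Int (List Char)) (k : Int) (hk : k ∈ l) :
    (l.foldl (fun d o => d.insert o (f o)) d).get? k = some (f k) := by
  induction l generalizing d with
  | nil => cases hk
  | cons o l ih =>
    rw [List.foldl_cons]
    by_cases hl : k ∈ l
    · exact ih _ hl
    · have ho : k = o := by rcases List.mem_cons.mp hk with h | h; exact h; exact absurd h hl
      subst ho
      rw [pv_get?_foldl_insert_not_mem f l _ k hl, PySem.Dict.get?_insert_self]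

theorem pvTable_get (r : Int) (c : Char) (h : c.toNat < 256) :
    (pvTable r).get? (c.toNat : Int) = some (pvSeg r (c.toNat : Int)) := by
  unfold pvTable
  exact pv_get?_foldl_insert_mem _ _ _ _
    (PySem.List.mem_pyRange_one.mpr ⟨by positivity, by exact_mod_cast h⟩)

-- the per-character segment function shared by both programs, for row r < 3
def pvColSlice (row : List Char) (c : Char) : List Char :=
  if '0' ≤ c ∧ c ≤ '9' then
    PySem.List.slice row (some (((c.toNat : Int) - 48) * 3)) (some (((c.toNat : Int) - 48) * 3 + 3))
  else "  ".toList

def pvColBot (c : Char) : List Char :=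
  if '0' ≤ c ∧ c ≤ '9' then " .-----. ".toList else "     ".toList

-- one A-step appends exactly the shared per-character segments
theorem pvStepA_eq (a : List Char × List Char × List Char × List Char) (c : Char) :
    pvStepA a c = (a.1 ++ pvColSlice pvRow0 c, a.2.1 ++ pvColSlice pvRow1 c,
                   a.2.2.1 ++ pvColSlice pvRow2 c, a.2.2.2 ++ pvColBot c) := by
  unfold pvStepA pvColSlice pvColBot
  rw [pvDigitMap_get c]
  by_cases h : '0' ≤ c ∧ c ≤ '9' <;> simp [h]

-- A's whole loop in terms of the shared segment functions
theorem pvFoldA_eq (cs : List Char) (a : List Char × List Char × List Char × List Char) :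
    cs.foldl pvStepA a =
      (a.1 ++ cs.flatMap (pvColSlice pvRow0),
       a.2.1 ++ cs.flatMap (pvColSlice pvRow1),
       a.2.2.1 ++ cs.flatMap (pvColSlice pvRow2),
       a.2.2.2 ++ cs.flatMap pvColBot) := by
  induction cs generalizing a with
  | nil => simp
  | cons c cs ih =>
    rw [List.foldl_cons, pvStepA_eq, ih]
    simp [List.append_assoc]

-- digit test on code points agrees with the Char comparison
theorem pv_digit_iff (c : Char) :
    (48 ≤ (c.toNat : Int) ∧ (c.toNat : Int) ≤ 57) ↔ ('0' ≤ c ∧ c ≤ '9') := by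
  constructor
  · rintro ⟨h1, h2⟩
    exact ⟨by exact_mod_cast h1, by exact_mod_cast h2⟩
  · rintro ⟨h1, h2⟩
    have h1' : 48 ≤ c.toNat := h1
    have h2' : c.toNat ≤ 57 := h2
    exact ⟨by exact_mod_cast h1', by exact_mod_cast h2'⟩

-- B's translate step at a domain character equals the shared segment (rows 0-2)
theorem pvTranslate_step (r : Int) (row : List Char) (hr : 0 ≤ r ∧ r < 3)
    (hrow : PySem.List.pyGetD [pvRow0, pvRow1, pvRow2] r [] = row)
    (c : Char) (hc : pvDomChar c = true) :
    ((pvTable r).get? (c.toNat : Int)).getD [c] = pvColSlice row c := by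
  have h256 : c.toNat < 256 := by
    simp [pvDomChar] at hc; omega
  rw [pvTable_get r c h256]
  unfold pvSeg pvColSlice
  rw [hrow]
  have hr3 : r ≠ 3 := by omega
  by_cases h : '0' ≤ c ∧ c ≤ '9'
  · rw [if_pos ((pv_digit_iff c).mpr h), if_neg hr3, if_pos h, Option.getD_some]
  · rw [if_neg (fun hh => h ((pv_digit_iff c).mp hh)), if_neg hr3, if_neg h, Option.getD_some]

-- B's translate step at a domain character equals the shared segment (row 3)
theorem pvTranslate_step3 (c : Char) (hc : pvDomChar c = true) :
    ((pvTable 3).get? (c.toNat : Int)).getD [c] = pvColBot c := by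
  have h256 : c.toNat < 256 := by
    simp [pvDomChar] at hc; omega
  rw [pvTable_get 3 c h256]
  unfold pvSeg pvColBot
  by_cases h : '0' ≤ c ∧ c ≤ '9'
  · rw [if_pos ((pv_digit_iff c).mpr h), if_pos rfl, if_pos h, Option.getD_some]
  · rw [if_neg (fun hh => h ((pv_digit_iff c).mp hh)), if_pos rfl, if_neg h, Option.getD_some]

-- whole-string version of the two step lemmas
theorem pvTranslate_eq (r : Int) (row : List Char) (hr : 0 ≤ r ∧ r < 3)
    (hrow : PySem.List.pyGetD [pvRow0, pvRow1, pvRow2] r [] = row)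
    (cs : List Char) (hcs : ∀ c ∈ cs, pvDomChar c = true) :
    pvTranslate (pvTable r) cs = cs.flatMap (pvColSlice row) := by
  unfold pvTranslate
  exact List.flatMap_congr fun c hc => pvTranslate_step r row hr hrow c (hcs c hc)

theorem pvTranslate_eq3 (cs : List Char) (hcs : ∀ c ∈ cs, pvDomChar c = true) :
    pvTranslate (pvTable 3) cs = cs.flatMap pvColBot := by
  unfold pvTranslate
  exact List.flatMap_congr fun c hc => pvTranslate_step3 c (hcs c hc)

-- ===== VERDICT (by name: the statement is the Claim_ definition above) =====
theorem create_framed_digital_clock_spec : Claim_equal_create_framed_digital_clock := by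
  intro time_str hdom
  have hdom' : pvDomStr time_str = true := hdom
  have hcs : ∀ c ∈ time_str.toList, pvDomChar c = true := by
    simpa [pvDomStr, List.all_eq_true] using hdom'
  unfold Spec_create_framed_digital_clock create_framed_digital_clock create_framed_digital_clock_alt
  have hrange : PySem.List.pyRange 0 4 1 = [0, 1, 2, 3] := by decide
  rw [pvFoldA_eq, hrange]
  simp only [List.map_cons, List.map_nil]
  rw [pvTranslate_eq 0 pvRow0 (by omega) (by decide) _ hcs,
      pvTranslate_eq 1 pvRow1 (by omega) (by decide) _ hcs,
      pvTranslate_eq 2 pvRow2 (by omega) (by decide) _ hcs,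
      pvTranslate_eq3 _ hcs]
  simp
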